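-- pv_equiv track=rewrite | github.com/cathuan/LeetCode-Questions | python3/q2558.py | pickGifts
-- ===== SOURCE A (Python) =====
-- from typing import List
-- from heapq import heappush, heappop
-- import math
--
-- def pickGifts(gifts: List[int], k: int) -> int:
--     heap = []
--     for gift in gifts:
--         heappush(heap, -gift)
--
--     for idx in range(k):
--         gift = - heappop(heap)
--         if gift == 1:
--             return len(gifts)
--         new_gift = int(math.sqrt(gift))
--         heappush(heap, -new_gift)
--
--     return -sum(heap)
-- ===== SOURCE B (Python) =====
-- import math
-- from typing import List
--
--
-- def pickGifts(gifts: List[int], k: int) -> int: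
--     # Sorted list instead of a heap: the maximum is always at the end; its integer
--     # square root is re-inserted at the position found by a hand-rolled bisect_right.
--     vals = sorted(gifts)
--     for _ in range(k):
--         m = vals.pop()
--         if m == 1:
--             return len(gifts)
--         s = math.isqrt(m)
--         lo, hi = 0, len(vals)
--         while lo < hi:
--             mid = (lo + hi) // 2
--             if s < vals[mid]:
--                 hi = mid
--             else:
--                 lo = mid + 1
--         vals.insert(lo, s)
--     return sum(vals)
-- ===== Notes on version B (the rewrite author's own statement) =====
-- stated objective: alternative
-- what changed: Replaces the heap of negated values (heappush/heappop) with an ascending sorted list maintained in place: pop the last element as the maximum and re-insert its integer square root at the position found by a hand-rolled bisect_right; it trades heap sifting for binary search plus positional insertion.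
import Mathlib
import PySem

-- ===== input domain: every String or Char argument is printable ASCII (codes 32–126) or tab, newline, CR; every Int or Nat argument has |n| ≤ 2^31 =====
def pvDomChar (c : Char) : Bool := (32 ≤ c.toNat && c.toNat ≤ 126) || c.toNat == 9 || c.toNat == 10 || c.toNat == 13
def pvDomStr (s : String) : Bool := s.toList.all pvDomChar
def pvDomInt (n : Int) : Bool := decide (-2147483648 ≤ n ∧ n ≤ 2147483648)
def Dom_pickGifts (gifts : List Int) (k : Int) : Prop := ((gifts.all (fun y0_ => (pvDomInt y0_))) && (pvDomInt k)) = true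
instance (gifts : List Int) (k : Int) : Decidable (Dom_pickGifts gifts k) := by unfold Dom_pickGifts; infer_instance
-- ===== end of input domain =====

-- B replaces A's heap of negated values with an ascending sorted list: pop the last element
-- as the maximum, re-insert its integer square root at the bisect_right position (objective:
-- alternative). B copies `gifts` via sorted(), so neither version mutates the argument.


-- ===== PORT A =====
-- The heapq heap is modeled as the multiset of its entries held in a list: heappush appends,
-- heappop removes and returns the minimum entry (first occurrence).  This is exact for the
-- return value, which depends only on the multiset of heap entries.
-- `int(math.sqrt(gift))` is ported as the integer square root of `gift.toNat`: exact for
-- 0 ≤ gift ≤ 2^31 (there float sqrt truncation equals isqrt); a negative popped gift makes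
-- Python's math.sqrt raise ValueError and is excluded by Pre_pickGifts.
def pickGiftsLoop (heap : List Int) (n : Int) : Nat → Int
  | 0 => -(heap.sum)
  | j+1 =>
    match PySem.List.min? heap (fun x => x) with
    | none => 0   -- heappop of an empty heap: IndexError, excluded by Pre_pickGifts
    | some m =>
      let gift := -m
      if gift == 1 then n
      else pickGiftsLoop ((heap.erase m) ++ [-(Int.ofNat gift.toNat.sqrt)]) n j

def pickGifts (gifts : List Int) (k : Int) : Int :=
  let heap := gifts.foldl (fun h g => h ++ [-g]) []
  pickGiftsLoop heap gifts.length k.toNat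

-- ===== PORT B =====
-- `sorted(gifts)` → PySem.List.sorted; `vals.pop()` → last element + dropLast (none on the
-- empty list = IndexError, excluded by Pre_pickGifts); the hand-written while-loop in Source B is
-- exactly bisect.bisect_right's algorithm and is ported as the prelude's PySem.List.bisectRight;
-- `math.isqrt(m)` → `m.toNat.sqrt` (exact for m ≥ 0; negative m raises, excluded by Pre_).
def pickGiftsAltLoop (vals : List Int) (n : Int) : Nat → Int
  | 0 => vals.sum
  | j+1 =>
    match vals.getLast? with
    | none => 0   -- vals.pop() on the empty list: IndexError, excluded by Pre_pickGifts
    | some m =>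
      if m == 1 then n
      else
        let rest := vals.dropLast
        let s : Int := Int.ofNat m.toNat.sqrt
        pickGiftsAltLoop (rest.insertIdx (PySem.List.bisectRight rest s) s) n j

def pickGifts_alt (gifts : List Int) (k : Int) : Int :=
  pickGiftsAltLoop (PySem.List.sorted gifts (fun x => x) false) gifts.length k.toNat

-- ===== PRECONDITION & SPEC =====
-- A raises iff k > 0 and the heap is empty (IndexError) or every gift is negative
-- (math.sqrt of the popped negative maximum: ValueError); Pre_ excludes exactly those inputs.
def Pre_pickGifts (gifts : List Int) (k : Int) : Prop :=
  k ≤ 0 ∨ ∃ g ∈ gifts, 0 ≤ g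
instance (gifts : List Int) (k : Int) : Decidable (Pre_pickGifts gifts k) := by
  unfold Pre_pickGifts; infer_instance
def pvWitness_pickGifts : List Int × Int := ([5, 2], 2)

def Spec_pickGifts (gifts : List Int) (k : Int) (out : Int) : Prop := out = pickGifts_alt gifts k
instance (gifts : List Int) (k : Int) (out : Int) : Decidable (Spec_pickGifts gifts k out) := by unfold Spec_pickGifts; infer_instance

-- ===== CLAIM (what is proved, stated in full; the proofs are below) =====
def Claim_equal_pickGifts : Prop := ∀ (gifts : List Int) (k : Int), Dom_pickGifts gifts k → Pre_pickGifts gifts k → Spec_pickGifts gifts k (pickGifts gifts k)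

-- ===== LEMMAS AND PROOFS =====

theorem sum_map_neg_int (v : List Int) : (v.map (fun x => -x)).sum = -v.sum := by
  induction v with
  | nil => simp
  | cons a t ih => simp [ih]; ring

-- the minimum of a permutation of the negated list is the negated maximum
theorem min?_of_perm_neg (h v : List Int) (m : Int)
    (hp : h.Perm (v.map (fun x => -x)))
    (hmem : m ∈ v) (hmax : ∀ y ∈ v, y ≤ m) :
    PySem.List.min? h (fun x => x) = some (-m) := by
  have hne : h ≠ [] := by
    intro hnil
    rw [hnil] at hp
    have := hp.symm.eq_nil
    simp at this
    rw [this] at hmem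
    simp at hmem
  obtain ⟨mh, hmh⟩ : ∃ mh, PySem.List.min? h (fun x => x) = some mh := by
    cases hmin : PySem.List.min? h (fun x => x) with
    | none => exact absurd ((PySem.List.min?_eq_none_iff _ _).mp hmin) hne
    | some mh => exact ⟨mh, rfl⟩
  have hmh_mem : mh ∈ h := PySem.List.min?_mem hmh
  have hmh_min : ∀ y ∈ h, mh ≤ y := fun y hy => PySem.List.min?_isMin hmh y hy
  have hneg_mem : (-m) ∈ h := hp.mem_iff.mpr (List.mem_map.mpr ⟨m, hmem, rfl⟩)
  have h1 : mh ≤ -m := hmh_min _ hneg_mem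
  have h2 : -m ≤ mh := by
    obtain ⟨y, hy, hym⟩ := List.mem_map.mp (hp.mem_iff.mp hmh_mem)
    have := hmax y hy
    omega
  rw [hmh]
  congr 1
  omega

-- in an ascending list the last element is a maximum
theorem getLast_isMax (v : List Int) (hs : v.Pairwise (· ≤ ·)) (hne : v ≠ []) :
    ∀ y ∈ v, y ≤ v.getLast hne := by
  intro y hy
  rw [← List.dropLast_append_getLast hne] at hy hs
  rcases List.mem_append.mp hy with hmem | hmem
  · exact (List.pairwise_append.mp hs).2.2 y hmem _ (List.mem_singleton_self _)
  · rw [List.mem_singleton.mp hmem]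

theorem erase_append_singleton_perm (l : List Int) (a : Int) :
    ((l ++ [a]).erase a).Perm l := by
  by_cases hmem : a ∈ l
  · rw [List.erase_append_left _ hmem]
    calc l.erase a ++ [a]
        |>.Perm ([a] ++ l.erase a) := List.perm_append_comm
      _ = a :: l.erase a := rfl
      _ |>.Perm l := (List.perm_cons_erase hmem).symm
  · rw [List.erase_append_right _ hmem, List.erase_cons_head, List.append_nil]

theorem insertIdx_eq_take_cons_drop (l : List Int) (i : Nat) (x : Int) (h : i ≤ l.length) :
    l.insertIdx i x = l.take i ++ x :: l.drop i := by
  induction l generalizing i with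
  | nil =>
    have : i = 0 := by simpa using h
    subst this
    rfl
  | cons a t ih =>
    cases i with
    | zero => rfl
    | succ i => simp [List.insertIdx_succ_cons, ih i (by simpa using h)]

-- inserting at the bisect_right position keeps the list ascending
theorem pairwise_insert_bisect (d : List Int) (s : Int) (hd : d.Pairwise (· ≤ ·)) :
    (d.insertIdx (PySem.List.bisectRight d s) s).Pairwise (· ≤ ·) := by
  obtain ⟨hle, hbefore, hafter⟩ := PySem.List.bisectRight_spec d s hd
  set i := PySem.List.bisectRight d s with hi
  rw [insertIdx_eq_take_cons_drop d i s hle]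
  have hsplit : d.take i ++ d.drop i = d := List.take_append_drop i d
  have hcross : ∀ a ∈ d.take i, ∀ b ∈ d.drop i, a ≤ b := by
    have := (List.pairwise_append.mp (hsplit ▸ hd)).2.2
    exact this
  rw [List.pairwise_append]
  refine ⟨List.Pairwise.sublist (List.take_sublist i d) hd, ?_, ?_⟩
  · rw [List.pairwise_cons]
    refine ⟨?_, List.Pairwise.sublist (List.drop_sublist i d) hd⟩
    intro b hb
    obtain ⟨j, hj, hjb⟩ := List.mem_drop_iff_getElem.mp hb
    have := hafter (i + j) (by omega) (by omega)
    omega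
  · intro a ha b hb
    obtain ⟨j, hj, hja⟩ := List.mem_take_iff_getElem.mp ha
    have haj : a ≤ s := by
      have := hbefore j (by omega) (by omega)
      omega
    rcases List.mem_cons.mp hb with rfl | hb
    · exact haj
    · exact hcross a ha b hb

theorem loop_eq (j : Nat) (h v : List Int) (n : Int)
    (hp : h.Perm (v.map (fun x => -x))) (hs : v.Pairwise (· ≤ ·)) :
    pickGiftsLoop h n j = pickGiftsAltLoop v n j := by
  induction j generalizing h v with
  | zero =>
    simp only [pickGiftsLoop, pickGiftsAltLoop]
    rw [hp.sum_eq, sum_map_neg_int]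
    ring
  | succ j ih =>
    simp only [pickGiftsLoop, pickGiftsAltLoop]
    cases hv : v with
    | nil =>
      subst hv
      have : h = [] := by simpa using hp.eq_nil
      rw [this]
      rfl
    | cons a t =>
      have hne : v ≠ [] := by rw [hv]; simp
      rw [← hv]
      set m := v.getLast hne with hm
      have hglast : v.getLast? = some m := List.getLast?_eq_some_getLast hne
      rw [hglast]
      have hmem : m ∈ v := List.getLast_mem hne
      have hmax : ∀ y ∈ v, y ≤ m := getLast_isMax v hs hne
      rw [min?_of_perm_neg h v m hp hmem hmax]
      simp only [neg_neg]
      by_cases hm1 : m = 1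
      · simp [hm1]
      · have : (m == 1) = false := by simp [hm1]
        rw [this]
        simp only [Bool.false_eq_true, if_false]
        set s : Int := Int.ofNat m.toNat.sqrt with hsdef
        set d := v.dropLast with hd
        have hds : d.Pairwise (· ≤ ·) := List.Pairwise.sublist (List.dropLast_sublist v) hs
        have hvsplit : d ++ [m] = v := List.dropLast_append_getLast hne
        have hile : PySem.List.bisectRight d s ≤ d.length :=
          (PySem.List.bisectRight_spec d s hds).1
        apply ih
        · -- multiset invariant
          calc h.erase (-m) ++ [-s]
              |>.Perm ((v.map (fun x => -x)).erase (-m) ++ [-s]) :=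
                (hp.erase (-m)).append_right _
            _ = ((d.map (fun x => -x) ++ [-m]).erase (-m)) ++ [-s] := by
                rw [← hvsplit]; simp
            _ |>.Perm (d.map (fun x => -x) ++ [-s]) :=
                (erase_append_singleton_perm _ _).append_right _
            _ |>.Perm ((s :: d).map (fun x => -x)) := by
                simp only [List.map_cons]
                calc d.map (fun x => -x) ++ [-s]
                    |>.Perm ([-s] ++ d.map (fun x => -x)) := List.perm_append_comm
                  _ = -s :: d.map (fun x => -x) := rfl
            _ |>.Perm ((d.insertIdx (PySem.List.bisectRight d s) s).map (fun x => -x)) :=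
                ((List.perm_insertIdx s d hile).map _).symm
        · exact pairwise_insert_bisect d s hds

-- ===== VERDICT (by name: the statement is the Claim_ definition above) =====
theorem pickGifts_spec : Claim_equal_pickGifts := by
  intro gifts k _ _
  unfold Spec_pickGifts pickGifts pickGifts_alt
  simp only [PySem.List.foldl_append_singleton_eq_map, List.nil_append]
  apply loop_eq
  · exact ((PySem.List.sorted_perm gifts (fun x => x) false).map _).symm
  · exact PySem.List.sorted_pairwise gifts (fun x => x)
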